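-- pv_equiv track=rewrite | github.com/QuentinDubois-Polytech/PCP | C2022_4/corrections/D4_py.py | find_3
-- ===== SOURCE A (Python) =====
-- from collections import defaultdict
--
-- MOD = 2**59-55
--
-- OFF = ord('A')
--
-- def compare(s, n, l):
--   t = [True]*len(l)
--   for i in range(len(l)):
--     if t[i]:
--       t[i] = False
--       res, wit = 1, s[l[i]:l[i]+n]
--       for j in range(i+1, len(l)):
--         if wit == s[l[j]:l[j]+n]:
--           res += 1
--           t[j] = False
--           if res == 3:
--             return True
--   return False
--
-- def find_3(s, n):
--   D = defaultdict(list)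
--   if n > len(s)-2:
--     return False
--   if n == 0:
--     return True
--   key = 0
--   rem = pow(26, n-1, MOD)
--   for i in range(n):
--     key = (key*26+ord(s[i])-OFF) % MOD
--   D[key].append(0)
--   for i in range(n, len(s)):
--     key = (key-rem*(ord(s[i-n])-OFF))
--     key = (key*26+ord(s[i])-OFF) % MOD
--     D[key].append(i-n+1)
--     if len(D[key]) > 2:
--       if compare(s, n, D[key]):
--         return True
--   return False
-- ===== SOURCE B (Python) =====
-- def find_3(s, n):
--     counts = {}
--     for i in range(len(s) - n + 1):
--         w = s[i:i+n]
--         c = counts.get(w, 0) + 1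
--         if c == 3:
--             return True
--         counts[w] = c
--     return False
-- ===== Notes on version B (the rewrite author's own statement) =====
-- stated objective: simpler
-- what changed: Replaces the rolling-hash machinery (modular key updates, collision buckets, and the pairwise 'compare' scan with marker flags) by one pass that counts each length-n substring directly in a dictionary and returns True as soon as a count reaches 3; the guards for n == 0 and n > len(s)-2 disappear because direct counting already gives those answers.
-- outside the precondition, e.g. on find_3('', -1): A returns False, B returns False
import Mathlib
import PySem

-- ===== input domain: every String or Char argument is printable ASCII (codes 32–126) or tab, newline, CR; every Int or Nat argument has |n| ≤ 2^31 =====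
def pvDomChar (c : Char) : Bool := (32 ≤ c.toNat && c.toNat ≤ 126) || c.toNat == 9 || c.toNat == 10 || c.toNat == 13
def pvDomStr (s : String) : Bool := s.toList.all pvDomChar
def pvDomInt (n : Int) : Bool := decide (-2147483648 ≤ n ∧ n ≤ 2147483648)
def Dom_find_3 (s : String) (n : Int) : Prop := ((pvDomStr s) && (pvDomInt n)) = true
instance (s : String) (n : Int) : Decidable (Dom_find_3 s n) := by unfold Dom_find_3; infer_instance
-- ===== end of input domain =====

-- B replaces A's rolling hash + collision buckets + pairwise compare by one direct
-- substring-counting pass over a dictionary (simpler; same answers, not claimed faster).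

-- ===== PORT A =====
-- A's module constants MOD = 2**59-55 and OFF = ord('A')
def pvMOD : Int := 2 ^ 59 - 55
def pvOFF : Int := 65

-- s[p:p+n] as used by compare (l holds Int positions)
def pvWin (cs : List Char) (p : Int) (n : Int) : List Char :=
  PySem.List.slice cs (some p) (some (p + n))

-- inner loop of compare: 'for j in range(i+1, len(l)): …'; none = 'return True'
def pvCmpJ (cs : List Char) (n : Int) (l : List Int) (wit : List Char)
    (t : List Bool) (res : Int) (j : Nat) : Option (List Bool) :=
  if hj : j < l.length then
    if wit = pvWin cs l[j] n then
      let res' := res + 1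
      let t' := t.set j false
      if res' = 3 then none
      else pvCmpJ cs n l wit t' res' (j + 1)
    else pvCmpJ cs n l wit t res (j + 1)
  else some t
termination_by l.length - j

-- outer loop of compare: 'for i in range(len(l)): …'
def pvCmpI (cs : List Char) (n : Int) (l : List Int) (t : List Bool) (i : Nat) : Bool :=
  if hi : i < l.length then
    if t.getD i false then
      let t' := t.set i false
      match pvCmpJ cs n l (pvWin cs l[i] n) t' 1 (i + 1) with
      | none => true
      | some t'' => pvCmpI cs n l t'' (i + 1)
    else pvCmpI cs n l t (i + 1)
  else false
termination_by l.length - i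

-- compare(s, n, l)
def pvCompare (cs : List Char) (n : Int) (l : List Int) : Bool :=
  pvCmpI cs n l (List.replicate l.length true) 0

-- main loop of find_3: 'for i in range(n, len(s)): …'
def pvMainLoop (cs : List Char) (n : Int) (rem : Int) (key : Int)
    (D : PySem.Dict Int (List Int)) (i : Nat) : Bool :=
  if hi : i < cs.length then
    let key1 := key - rem * (((cs.getD (i - n.toNat) 'A').toNat : Int) - pvOFF)
    let key2 := PySem.Int.mod (key1 * 26 + (((cs.getD i 'A').toNat : Int) - pvOFF)) pvMOD
    let bucket := D.getD key2 [] ++ [(i : Int) - n + 1]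
    let D' := D.insert key2 bucket
    if 2 < bucket.length then
      if pvCompare cs n bucket then true
      else pvMainLoop cs n rem key2 D' (i + 1)
    else pvMainLoop cs n rem key2 D' (i + 1)
  else false
termination_by cs.length - i

def find_3 (s : String) (n : Int) : Bool :=
  let cs := s.toList
  if n > (cs.length : Int) - 2 then false
  else if n = 0 then true
  else
    let rem := PySem.Int.powMod 26 (n - 1).toNat pvMOD
    let key := (List.range n.toNat).foldl
        (fun k i => PySem.Int.mod (k * 26 + (((cs.getD i 'A').toNat : Int) - pvOFF)) pvMOD) 0
    pvMainLoop cs n rem key (PySem.Dict.empty.insert key [(0 : Int)]) n.toNat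

-- ===== PORT B =====
-- counting pass: 'for i in range(len(s)-n+1): …'
def pvAltLoop (cs : List Char) (n : Int) (counts : PySem.Dict (List Char) Int)
    (i cnt : Nat) : Bool :=
  if i < cnt then
    let w := PySem.List.slice cs (some (i : Int)) (some ((i : Int) + n))
    let c := counts.getD w 0 + 1
    if c = 3 then true
    else pvAltLoop cs n (counts.insert w c) (i + 1) cnt
  else false
termination_by cnt - i

def find_3_alt (s : String) (n : Int) : Bool :=
  let cs := s.toList
  pvAltLoop cs n PySem.Dict.empty 0 ((cs.length : Int) - n + 1).toNat

-- ===== PRECONDITION & SPEC =====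
-- Pre_ restricts to the natural domain n ≥ 0: for negative n A's forward index i-n
-- runs past the end of the string and A (almost) always raises IndexError there.
def Pre_find_3 (s : String) (n : Int) : Prop := 0 ≤ n
instance (s : String) (n : Int) : Decidable (Pre_find_3 s n) := by unfold Pre_find_3; infer_instance
def pvWitness_find_3 : String × Int := ("abcabcabc", 3)

def Spec_find_3 (s : String) (n : Int) (out : Bool) : Prop := out = find_3_alt s n
instance (s : String) (n : Int) (out : Bool) : Decidable (Spec_find_3 s n out) := by unfold Spec_find_3; infer_instance

-- ===== CLAIM (what is proved, stated in full; the proofs are below) =====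
def Claim_equal_find_3 : Prop := ∀ (s : String) (n : Int), Dom_find_3 s n → Pre_find_3 s n → Spec_find_3 s n (find_3 s n)

-- ===== LEMMAS AND PROOFS =====

-- ---------- basic abbreviations (proof side) ----------

def pvVal (c : Char) : Int := (c.toNat : Int) - pvOFF

-- polynomial value of a window, no modulus
def pvPoly (vs : List Int) : Int := vs.foldl (fun k v => k * 26 + v) 0

-- the window of length m starting at Nat position q
def pvWinN (cs : List Char) (q m : Nat) : List Char := (cs.drop q).take m

-- the hash A maintains, as a function of the window
def pvHash (w : List Char) : Int :=
  w.foldl (fun k c => PySem.Int.mod (k * 26 + pvVal c) pvMOD) 0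

-- positions 0..m-1 as Ints (contents of A's dict, concatenated)
def pvPos (m : Nat) : List Int := (List.range m).map (fun q : Nat => (q : Int))

-- "some length-n window occurs at least three times among the first M windows"
def pvTrip (cs : List Char) (n : Int) (M : Nat) : Prop :=
  ∃ w, 3 ≤ (List.range M).countP (fun q : Nat => decide (pvWin cs (q : Int) n = w))

lemma pvMOD_pos : (0 : Int) < pvMOD := by decide

lemma pv_mod_key (a b c : Int) : (a % pvMOD * b + c) % pvMOD = (a * b + c) % pvMOD := by
  have h : Int.ModEq pvMOD (a % pvMOD) a := Int.emod_emod_of_dvd a dvd_rfl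
  exact (h.mul_right b).add_right c

lemma pvHash_foldl (w : List Char) (k : Int) :
    w.foldl (fun k c => PySem.Int.mod (k * 26 + pvVal c) pvMOD) (k % pvMOD)
      = (w.foldl (fun k v => k * 26 + pvVal v) k) % pvMOD := by
  induction w generalizing k with
  | nil => simp
  | cons c w ih =>
    simp only [List.foldl_cons]
    rw [PySem.Int.mod_eq_emod_of_pos pvMOD_pos, pv_mod_key]
    exact ih (k * 26 + pvVal c)

lemma pvHash_eq_poly (w : List Char) : pvHash w = pvPoly (w.map pvVal) % pvMOD := by
  have h0 : (0 : Int) = 0 % pvMOD := by decide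
  unfold pvHash pvPoly
  rw [List.foldl_map]
  conv_lhs => rw [h0]
  exact pvHash_foldl w 0

lemma pvPoly_init (vs : List Int) : ∀ k : Int,
    vs.foldl (fun k v => k * 26 + v) k = k * 26 ^ vs.length + pvPoly vs := by
  induction vs with
  | nil => intro k; simp [pvPoly]
  | cons v vs ih =>
    intro k
    have hv : pvPoly (v :: vs) = (0 * 26 + v) * 26 ^ vs.length + pvPoly vs := by
      show (v :: vs).foldl (fun k v => k * 26 + v) 0 = _
      simp only [List.foldl_cons]
      exact ih (0 * 26 + v)
    simp only [List.foldl_cons]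
    rw [ih (k * 26 + v), hv]
    simp only [List.length_cons, pow_succ]
    ring

lemma pvPoly_cons (v : Int) (vs : List Int) :
    pvPoly (v :: vs) = v * 26 ^ vs.length + pvPoly vs := by
  show (v :: vs).foldl (fun k v => k * 26 + v) 0 = _
  simp only [List.foldl_cons]
  rw [pvPoly_init vs (0 * 26 + v)]; ring

lemma pvPoly_snoc (vs : List Int) (v : Int) : pvPoly (vs ++ [v]) = pvPoly vs * 26 + v := by
  unfold pvPoly
  rw [List.foldl_append]
  simp

-- ---------- windows ----------

lemma pvWin_cast (cs : List Char) (q : Nat) (n : Int) (hn : 0 ≤ n) :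
    pvWin cs (q : Int) n = pvWinN cs q n.toNat := by
  have h : (q : Int) + n = (q : Int) + (n.toNat : Int) := by
    rw [Int.toNat_of_nonneg hn]
  unfold pvWin pvWinN
  rw [h, PySem.List.slice_natCast_add]

lemma pvWinN_length (cs : List Char) (q m : Nat) (h : q + m ≤ cs.length) :
    (pvWinN cs q m).length = m := by
  unfold pvWinN
  simp
  omega

lemma pvWinN_cons (cs : List Char) (q m : Nat) (hq : q < cs.length) (hm : 1 ≤ m) :
    pvWinN cs q m = cs.getD q 'A' :: pvWinN cs (q + 1) (m - 1) := by
  unfold pvWinN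
  obtain ⟨m', rfl⟩ : ∃ m', m = m' + 1 := ⟨m - 1, by omega⟩
  rw [List.drop_eq_getElem_cons hq, List.take_succ_cons]
  rw [List.getD_eq_getElem cs 'A' hq]
  simp

lemma pvWinN_snoc (cs : List Char) (q m : Nat) (h : q + m < cs.length) :
    pvWinN cs q (m + 1) = pvWinN cs q m ++ [cs.getD (q + m) 'A'] := by
  unfold pvWinN
  rw [List.take_add_one, List.getElem?_drop, List.getElem?_eq_getElem h]
  rw [List.getD_eq_getElem cs 'A' h]
  rfl

-- ---------- the rolling-hash update is the hash of the next window ----------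

lemma pvRoll (cs : List Char) (n : Int) (q : Nat) (hn : 1 ≤ n)
    (h : q + 1 + n.toNat ≤ cs.length) :
    PySem.Int.mod ((pvHash (pvWinN cs q n.toNat)
        - PySem.Int.powMod 26 (n - 1).toNat pvMOD * pvVal (cs.getD q 'A')) * 26
        + pvVal (cs.getD (q + n.toNat) 'A')) pvMOD
      = pvHash (pvWinN cs (q + 1) n.toNat) := by
  obtain ⟨m', hm'⟩ : ∃ m', n.toNat = m' + 1 := ⟨n.toNat - 1, by omega⟩
  have he : (n - 1).toNat = m' := by omega
  rw [hm', he]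
  have hq : q < cs.length := by omega
  set c1 := cs.getD q 'A' with hc1
  set c2 := cs.getD (q + (m' + 1)) 'A' with hc2
  set T := pvWinN cs (q + 1) m' with hT
  have hWq : pvWinN cs q (m' + 1) = c1 :: T := by
    have := pvWinN_cons cs q (m' + 1) hq (by omega)
    simpa using this
  have hW' : pvWinN cs (q + 1) (m' + 1) = T ++ [c2] := by
    have := pvWinN_snoc cs (q + 1) m' (by omega)
    rw [this]
    have : q + 1 + m' = q + (m' + 1) := by omega
    rw [this]
  have hTlen : (T.map pvVal).length = m' := by
    rw [List.length_map]
    exact pvWinN_length cs (q + 1) m' (by omega)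
  set PT := pvPoly (T.map pvVal) with hPT
  have hpWq : pvPoly ((pvWinN cs q (m' + 1)).map pvVal) = pvVal c1 * 26 ^ m' + PT := by
    rw [hWq, List.map_cons, pvPoly_cons, hTlen]
  have hpW' : pvPoly ((pvWinN cs (q + 1) (m' + 1)).map pvVal) = PT * 26 + pvVal c2 := by
    rw [hW', List.map_append, List.map_singleton, pvPoly_snoc]
  rw [PySem.Int.mod_eq_emod_of_pos pvMOD_pos]
  rw [pvHash_eq_poly, pvHash_eq_poly, hpWq, hpW']
  have hpm : PySem.Int.powMod 26 m' pvMOD = (26 : Int) ^ m' % pvMOD := by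
    unfold PySem.Int.powMod
    exact PySem.Int.mod_eq_emod_of_pos pvMOD_pos
  rw [hpm]
  have h1 : Int.ModEq pvMOD ((pvVal c1 * 26 ^ m' + PT) % pvMOD) (pvVal c1 * 26 ^ m' + PT) :=
    Int.emod_emod_of_dvd _ dvd_rfl
  have h2 : Int.ModEq pvMOD ((26 : Int) ^ m' % pvMOD) ((26 : Int) ^ m') :=
    Int.emod_emod_of_dvd _ dvd_rfl
  have hcong :
      Int.ModEq pvMOD
        (((pvVal c1 * 26 ^ m' + PT) % pvMOD - (26 : Int) ^ m' % pvMOD * pvVal c1) * 26 + pvVal c2)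
        (((pvVal c1 * 26 ^ m' + PT) - (26 : Int) ^ m' * pvVal c1) * 26 + pvVal c2) :=
    ((h1.sub (h2.mul_right (pvVal c1))).mul_right 26).add_right (pvVal c2)
  rw [hcong]
  congr 1
  ring

-- the initial key A computes is the hash of window 0
lemma pvInitKey (cs : List Char) (m : Nat) (hm : m ≤ cs.length) :
    (List.range m).foldl
        (fun k i => PySem.Int.mod (k * 26 + (((cs.getD i 'A').toNat : Int) - pvOFF)) pvMOD) 0
      = pvHash (pvWinN cs 0 m) := by
  induction m with
  | zero => simp [pvHash, pvWinN]
  | succ m ih =>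
    rw [List.range_succ, List.foldl_append, ih (by omega)]
    have hsn : pvWinN cs 0 (m + 1) = pvWinN cs 0 m ++ [cs.getD (0 + m) 'A'] :=
      pvWinN_snoc cs 0 m (by omega)
    rw [hsn]
    unfold pvHash
    rw [List.foldl_append]
    simp [pvVal]

-- ---------- compare ----------

lemma pvCmpJ_sound (cs : List Char) (n : Int) (l : List Int) (wit : List Char) :
    ∀ j t res, pvCmpJ cs n l wit t res j = none →
      3 ≤ res + ((l.drop j).countP (fun p => decide (pvWin cs p n = wit)) : Int) := by
  suffices h : ∀ d j t res, l.length - j ≤ d → pvCmpJ cs n l wit t res j = none →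
      3 ≤ res + ((l.drop j).countP (fun p => decide (pvWin cs p n = wit)) : Int) by
    intro j t res
    exact h l.length j t res (by omega)
  intro d
  induction d with
  | zero =>
    intro j t res hle hnone
    rw [pvCmpJ, dif_neg (by omega)] at hnone
    exact absurd hnone (by simp)
  | succ d ih =>
    intro j t res hle hnone
    rw [pvCmpJ] at hnone
    by_cases hj : j < l.length
    · rw [dif_pos hj] at hnone
      rw [List.drop_eq_getElem_cons hj, List.countP_cons]
      by_cases hw : wit = pvWin cs l[j] n
      · rw [if_pos hw] at hnone
        simp only [] at hnone
        have hdec : decide (pvWin cs l[j] n = wit) = true := by simp [hw]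
        simp only [hdec]
        by_cases h3 : res + 1 = 3
        · push_cast
          omega
        · rw [if_neg h3] at hnone
          have := ih (j + 1) (t.set j false) (res + 1) (by omega) hnone
          push_cast at this ⊢
          omega
      · rw [if_neg hw] at hnone
        have := ih (j + 1) t res (by omega) hnone
        have hdec : decide (pvWin cs l[j] n = wit) = false := by
          simp only [decide_eq_false_iff_not]
          exact fun hh => hw hh.symm
        simp only [hdec]
        push_cast at this ⊢
        omega
    · rw [dif_neg hj] at hnone
      exact absurd hnone (by simp)

lemma pvCmpJ_complete (cs : List Char) (n : Int) (l : List Int) (wit : List Char) :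
    ∀ j t res, res ≤ 2 →
      3 ≤ res + ((l.drop j).countP (fun p => decide (pvWin cs p n = wit)) : Int) →
      pvCmpJ cs n l wit t res j = none := by
  suffices h : ∀ d j t res, l.length - j ≤ d → res ≤ 2 →
      3 ≤ res + ((l.drop j).countP (fun p => decide (pvWin cs p n = wit)) : Int) →
      pvCmpJ cs n l wit t res j = none by
    intro j t res
    exact h l.length j t res (by omega)
  intro d
  induction d with
  | zero =>
    intro j t res hle hres h3
    rw [List.drop_eq_nil_of_le (by omega), List.countP_nil] at h3
    omega
  | succ d ih =>
    intro j t res hle hres h3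
    by_cases hj : j < l.length
    · rw [pvCmpJ, dif_pos hj]
      rw [List.drop_eq_getElem_cons hj, List.countP_cons] at h3
      by_cases hw : wit = pvWin cs l[j] n
      · rw [if_pos hw]
        simp only []
        by_cases hr3 : res + 1 = 3
        · rw [if_pos hr3]
        · rw [if_neg hr3]
          apply ih (j + 1) (t.set j false) (res + 1) (by omega) (by omega)
          have hdec : decide (pvWin cs l[j] n = wit) = true := by simp [hw]
          simp only [hdec] at h3
          push_cast at h3 ⊢
          omega
      · rw [if_neg hw]
        apply ih (j + 1) t res (by omega) hres
        have hdec : decide (pvWin cs l[j] n = wit) = false := by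
          simp only [decide_eq_false_iff_not]
          exact fun hh => hw hh.symm
        simp only [hdec] at h3
        push_cast at h3 ⊢
        omega
    · rw [List.drop_eq_nil_of_le (by omega), List.countP_nil] at h3
      omega

lemma pvCmpJ_marks (cs : List Char) (n : Int) (l : List Int) (wit : List Char) :
    ∀ j t res t', pvCmpJ cs n l wit t res j = some t' →
      ∀ j', t'.getD j' false = false →
        t.getD j' false = false ∨ (j ≤ j' ∧ ∃ hj : j' < l.length, pvWin cs l[j'] n = wit) := by
  suffices h : ∀ d j t res t', l.length - j ≤ d → pvCmpJ cs n l wit t res j = some t' →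
      ∀ j', t'.getD j' false = false →
        t.getD j' false = false ∨ (j ≤ j' ∧ ∃ hj : j' < l.length, pvWin cs l[j'] n = wit) by
    intro j t res t'
    exact h l.length j t res t' (by omega)
  intro d
  induction d with
  | zero =>
    intro j t res t' hle hsome j' hj'
    rw [pvCmpJ, dif_neg (by omega)] at hsome
    cases hsome
    exact Or.inl hj'
  | succ d ih =>
    intro j t res t' hle hsome j' hj'
    rw [pvCmpJ] at hsome
    by_cases hj : j < l.length
    · rw [dif_pos hj] at hsome
      by_cases hw : wit = pvWin cs l[j] n
      · rw [if_pos hw] at hsome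
        simp only [] at hsome
        by_cases hr3 : res + 1 = 3
        · rw [if_pos hr3] at hsome
          exact absurd hsome (by simp)
        · rw [if_neg hr3] at hsome
          rcases ih (j + 1) (t.set j false) (res + 1) t' (by omega) hsome j' hj' with hL | hR
          · by_cases hjj : j' = j
            · subst hjj
              exact Or.inr ⟨le_refl _, hj, hw.symm⟩
            · left
              rw [List.getD_eq_getElem?_getD, List.getElem?_set_ne (by omega)] at hL
              rw [List.getD_eq_getElem?_getD]
              exact hL
          · exact Or.inr ⟨by omega, hR.2⟩
      · rw [if_neg hw] at hsome
        rcases ih (j + 1) t res t' (by omega) hsome j' hj' with hL | hR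
        · exact Or.inl hL
        · exact Or.inr ⟨by omega, hR.2⟩
    · rw [dif_neg hj] at hsome
      cases hsome
      exact Or.inl hj'

lemma pvCmpI_sound (cs : List Char) (n : Int) (l : List Int) :
    ∀ i t, pvCmpI cs n l t i = true →
      ∃ w, 3 ≤ l.countP (fun p => decide (pvWin cs p n = w)) := by
  suffices h : ∀ d i t, l.length - i ≤ d → pvCmpI cs n l t i = true →
      ∃ w, 3 ≤ l.countP (fun p => decide (pvWin cs p n = w)) by
    intro i t
    exact h l.length i t (by omega)
  intro d
  induction d with
  | zero =>
    intro i t hle htrue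
    rw [pvCmpI, dif_neg (by omega)] at htrue
    exact absurd htrue (by simp)
  | succ d ih =>
    intro i t hle htrue
    rw [pvCmpI] at htrue
    by_cases hi : i < l.length
    · rw [dif_pos hi] at htrue
      by_cases ht : t.getD i false = true
      · rw [if_pos ht] at htrue
        cases hcmp : pvCmpJ cs n l (pvWin cs l[i] n) (t.set i false) 1 (i + 1) with
        | none =>
          refine ⟨pvWin cs l[i] n, ?_⟩
          have hsound := pvCmpJ_sound cs n l (pvWin cs l[i] n) (i + 1) (t.set i false) 1 hcmp
          have hdrop : (l.drop i).countP (fun p => decide (pvWin cs p n = pvWin cs l[i] n))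
              = (l.drop (i + 1)).countP (fun p => decide (pvWin cs p n = pvWin cs l[i] n)) + 1 := by
            rw [List.drop_eq_getElem_cons hi, List.countP_cons]
            simp
          have hle' : (l.drop i).countP (fun p => decide (pvWin cs p n = pvWin cs l[i] n))
              ≤ l.countP (fun p => decide (pvWin cs p n = pvWin cs l[i] n)) :=
            (List.drop_sublist i l).countP_le
          omega
        | some t'' =>
          simp only [hcmp] at htrue
          exact ih (i + 1) t'' (by omega) htrue
      · rw [if_neg ht] at htrue
        exact ih (i + 1) t (by omega) htrue
    · rw [dif_neg hi] at htrue
      exact absurd htrue (by simp)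

lemma pvCmpI_complete (cs : List Char) (n : Int) (l : List Int) (w : List Char)
    (i0 : Nat) (hi0 : i0 < l.length) (hwi0 : pvWin cs l[i0] n = w)
    (hmin : ∀ j (hj : j < l.length), j < i0 → pvWin cs l[j] n ≠ w)
    (hw : 3 ≤ l.countP (fun p => decide (pvWin cs p n = w))) :
    ∀ i t, i ≤ i0 →
      (∀ j (hj : j < l.length), i ≤ j → t.getD j false = false →
        ∃ i', i' < i ∧ ∃ hi' : i' < l.length, pvWin cs l[i'] n = pvWin cs l[j] n) →
      pvCmpI cs n l t i = true := by
  have hfin : ∀ t : List Bool,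
      (∀ j (hj : j < l.length), i0 ≤ j → t.getD j false = false →
        ∃ i', i' < i0 ∧ ∃ hi' : i' < l.length, pvWin cs l[i'] n = pvWin cs l[j] n) →
      pvCmpI cs n l t i0 = true := by
    intro t hinv
    have ht : t.getD i0 false = true := by
      by_contra hf
      have hf' : t.getD i0 false = false := by
        cases hgd : t.getD i0 false
        · rfl
        · exact absurd hgd hf
      obtain ⟨i', hi', hil, hww⟩ := hinv i0 hi0 (le_refl _) hf'
      rw [hwi0] at hww
      exact hmin i' hil hi' hww
    rw [pvCmpI, dif_pos hi0, if_pos ht]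
    have hcnt0 : (l.take i0).countP (fun p => decide (pvWin cs p n = w)) = 0 := by
      rw [List.countP_eq_zero]
      intro a ha
      obtain ⟨j, hjlen, hja⟩ := List.mem_iff_getElem.mp ha
      have hjlt : j < i0 := by
        have := List.length_take_le i0 l
        omega
      have hjl : j < l.length := by omega
      rw [List.getElem_take] at hja
      subst hja
      simp only [decide_eq_true_eq]
      exact hmin j hjl hjlt
    have hsplit : l.countP (fun p => decide (pvWin cs p n = w))
        = (l.take i0).countP (fun p => decide (pvWin cs p n = w))
          + (l.drop i0).countP (fun p => decide (pvWin cs p n = w)) := by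
      conv_lhs => rw [← List.take_append_drop i0 l]
      rw [List.countP_append]
    have hdrop : (l.drop i0).countP (fun p => decide (pvWin cs p n = w))
        = (l.drop (i0 + 1)).countP (fun p => decide (pvWin cs p n = w)) + 1 := by
      rw [List.drop_eq_getElem_cons hi0, List.countP_cons]
      simp [hwi0]
    have hnone := pvCmpJ_complete cs n l (pvWin cs l[i0] n) (i0 + 1) (t.set i0 false) 1
      (by omega)
      (by rw [hwi0]; omega)
    simp only [hnone]
  suffices h : ∀ d i t, i0 - i ≤ d → i ≤ i0 →
      (∀ j (hj : j < l.length), i ≤ j → t.getD j false = false →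
        ∃ i', i' < i ∧ ∃ hi' : i' < l.length, pvWin cs l[i'] n = pvWin cs l[j] n) →
      pvCmpI cs n l t i = true by
    intro i t h1 h2
    exact h i0 i t (by omega) h1 h2
  intro d
  induction d with
  | zero =>
    intro i t hle hii hinv
    have heq : i = i0 := by omega
    subst heq
    exact hfin t hinv
  | succ d ih =>
    intro i t hle hii hinv
    by_cases heq : i = i0
    · subst heq
      exact hfin t hinv
    · have hilt : i < i0 := by omega
      have hi : i < l.length := by omega
      rw [pvCmpI, dif_pos hi]
      by_cases ht : t.getD i false = true
      · rw [if_pos ht]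
        cases hcmp : pvCmpJ cs n l (pvWin cs l[i] n) (t.set i false) 1 (i + 1) with
        | none => simp [hcmp]
        | some t'' =>
          simp only [hcmp]
          apply ih (i + 1) t'' (by omega) (by omega)
          intro j hj hij hmark
          rcases pvCmpJ_marks cs n l (pvWin cs l[i] n) (i + 1) (t.set i false) 1 t'' hcmp
              j hmark with hL | hR
          · rw [List.getD_eq_getElem?_getD, List.getElem?_set_ne (by omega),
              ← List.getD_eq_getElem?_getD] at hL
            obtain ⟨i', hi', hil, hww⟩ := hinv j hj (by omega) hL
            exact ⟨i', by omega, hil, hww⟩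
          · obtain ⟨hjl, hww⟩ := hR.2
            exact ⟨i, by omega, hi, hww.symm⟩
      · rw [if_neg ht]
        apply ih (i + 1) t (by omega) (by omega)
        intro j hj hij hmark
        obtain ⟨i', hi', hil, hww⟩ := hinv j hj (by omega) hmark
        exact ⟨i', by omega, hil, hww⟩

lemma pvCompare_spec (cs : List Char) (n : Int) (l : List Int) :
    pvCompare cs n l = true ↔ ∃ w, 3 ≤ l.countP (fun p => decide (pvWin cs p n = w)) := by
  constructor
  · intro h
    exact pvCmpI_sound cs n l 0 (List.replicate l.length true) h
  · rintro ⟨w, hw⟩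
    have hex : ∃ j, j < l.length ∧ pvWin cs (l.getD j 0) n = w := by
      have hpos : 0 < l.countP (fun p => decide (pvWin cs p n = w)) := by omega
      obtain ⟨a, ha, hpa⟩ := List.countP_pos_iff.mp hpos
      obtain ⟨j, hj, hja⟩ := List.mem_iff_getElem.mp ha
      refine ⟨j, hj, ?_⟩
      rw [List.getD_eq_getElem l 0 hj, hja]
      exact of_decide_eq_true hpa
    have hi0 := Nat.find_spec hex
    apply pvCmpI_complete cs n l w (Nat.find hex) hi0.1
      (by rw [← List.getD_eq_getElem l 0 hi0.1]; exact hi0.2)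
      (fun j hjl hji0 => by
        have := Nat.find_min hex hji0
        intro hww
        exact this ⟨hjl, by rw [List.getD_eq_getElem l 0 hjl]; exact hww⟩)
      hw 0 (List.replicate l.length true) (by omega)
    intro j hj h0j hmark
    rw [List.getD_eq_getElem?_getD, List.getElem?_replicate] at hmark
    simp [hj] at hmark

-- ---------- main loop ----------

lemma pvPos_succ (m : Nat) : pvPos (m + 1) = pvPos m ++ [(m : Int)] := by
  simp [pvPos, List.range_succ]

lemma pvTrip_iff_pos (cs : List Char) (n : Int) (M : Nat) :
    pvTrip cs n M ↔ ∃ w, 3 ≤ (pvPos M).countP (fun p => decide (pvWin cs p n = w)) := by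
  unfold pvTrip pvPos
  simp only [List.countP_map, Function.comp_def]

lemma pvPos_countP_mono (cs : List Char) (n : Int) (w : List Char) {m m' : Nat} (h : m ≤ m') :
    (pvPos m).countP (fun p => decide (pvWin cs p n = w))
      ≤ (pvPos m').countP (fun p => decide (pvWin cs p n = w)) := by
  simp only [pvPos]
  exact ((List.range_sublist.mpr h).map (fun q : Nat => (q : Int))).countP_le

lemma pvPos_length (m : Nat) : (pvPos m).length = m := by
  unfold pvPos
  simp

lemma pvMainLoop_spec (cs : List Char) (n : Int) (hn : 1 ≤ n) (hn' : n.toNat ≤ cs.length) :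
    ∀ i key D, n.toNat ≤ i → i ≤ cs.length →
      key = pvHash (pvWinN cs (i - n.toNat) n.toNat) →
      (∀ k : Int, D.getD k [] = (pvPos (i - n.toNat + 1)).filter
          (fun p => decide (pvHash (pvWin cs p n) = k))) →
      (∀ w, (pvPos (i - n.toNat + 1)).countP (fun p => decide (pvWin cs p n = w)) ≤ 2) →
      (pvMainLoop cs n (PySem.Int.powMod 26 (n - 1).toNat pvMOD) key D i = true
        ↔ pvTrip cs n (cs.length - n.toNat + 1)) := by
  suffices h : ∀ d i key D, cs.length - i ≤ d → n.toNat ≤ i → i ≤ cs.length →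
      key = pvHash (pvWinN cs (i - n.toNat) n.toNat) →
      (∀ k : Int, D.getD k [] = (pvPos (i - n.toNat + 1)).filter
          (fun p => decide (pvHash (pvWin cs p n) = k))) →
      (∀ w, (pvPos (i - n.toNat + 1)).countP (fun p => decide (pvWin cs p n = w)) ≤ 2) →
      (pvMainLoop cs n (PySem.Int.powMod 26 (n - 1).toNat pvMOD) key D i = true
        ↔ pvTrip cs n (cs.length - n.toNat + 1)) by
    intro i key D h1 h2 h3 h4 h5
    exact h cs.length i key D (by omega) h1 h2 h3 h4 h5
  intro d
  induction d with
  | zero =>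
    intro i key D hd h1 h2 hkey hD hcnt
    have hi : i = cs.length := by omega
    subst hi
    rw [pvMainLoop, dif_neg (by omega)]
    simp only [Bool.false_eq_true, false_iff]
    rw [pvTrip_iff_pos]
    rintro ⟨w, hw⟩
    exact absurd hw (by have := hcnt w; omega)
  | succ d ih =>
    intro i key D hd h1 h2 hkey hD hcnt
    by_cases hi : i < cs.length
    · rw [pvMainLoop, dif_pos hi]
      simp only []
      set q := i - n.toNat with hq
      have hkey2 : PySem.Int.mod
          ((key - PySem.Int.powMod 26 (n - 1).toNat pvMOD
              * (((cs.getD (i - n.toNat) 'A').toNat : Int) - pvOFF)) * 26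
            + (((cs.getD i 'A').toNat : Int) - pvOFF)) pvMOD
          = pvHash (pvWinN cs (q + 1) n.toNat) := by
        have hr := pvRoll cs n q hn (by omega)
        have hqi : q + n.toNat = i := by omega
        rw [hqi] at hr
        rw [hkey]
        unfold pvVal at hr
        exact hr
      rw [hkey2]
      set K := pvHash (pvWinN cs (q + 1) n.toNat) with hK
      have hcast : (i : Int) - n + 1 = (((q + 1 : Nat)) : Int) := by omega
      have hb : pvHash (pvWin cs (((q + 1 : Nat)) : Int) n) = K := by
        rw [pvWin_cast cs (q + 1) n (by omega), hK]
      have hbucket : D.getD K [] ++ [(i : Int) - n + 1]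
          = (pvPos (q + 2)).filter (fun p => decide (pvHash (pvWin cs p n) = K)) := by
        rw [hcast, hD K]
        have : q + 2 = (q + 1) + 1 := by omega
        rw [this, pvPos_succ (q + 1), List.filter_append, List.filter_singleton, hb]
        simp
      rw [hbucket]
      set bucket := (pvPos (q + 2)).filter (fun p => decide (pvHash (pvWin cs p n) = K))
        with hbk
      -- if some window occurs ≥ 3 times among the first q+2, the bucket holds all of them
      have hbig : ∀ w, 3 ≤ (pvPos (q + 2)).countP (fun p => decide (pvWin cs p n = w)) →
          3 ≤ bucket.countP (fun p => decide (pvWin cs p n = w)) := by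
        intro w hw3
        have hsplit : (pvPos (q + 2)).countP (fun p => decide (pvWin cs p n = w))
            = (pvPos (q + 1)).countP (fun p => decide (pvWin cs p n = w))
              + [(((q + 1 : Nat)) : Int)].countP (fun p => decide (pvWin cs p n = w)) := by
          have : q + 2 = (q + 1) + 1 := by omega
          rw [this, pvPos_succ (q + 1), List.countP_append]
        have hlast : pvWin cs (((q + 1 : Nat)) : Int) n = w := by
          by_contra hne
          have : [(((q + 1 : Nat)) : Int)].countP (fun p => decide (pvWin cs p n = w)) = 0 := by
            rw [List.countP_singleton, if_neg]
            simp only [decide_eq_true_eq]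
            exact hne
          have := hcnt w
          omega
        have hKw : pvHash w = K := by rw [← hlast]; exact hb
        rw [hbk, List.countP_filter]
        have : (pvPos (q + 2)).countP
            (fun p => decide (pvWin cs p n = w) && decide (pvHash (pvWin cs p n) = K))
            = (pvPos (q + 2)).countP (fun p => decide (pvWin cs p n = w)) := by
          apply List.countP_congr
          intro p _
          constructor
          · intro hpp
            exact (Bool.and_eq_true_iff.mp hpp).1
          · intro hpp
            have hww : pvWin cs p n = w := of_decide_eq_true hpp
            have : pvHash (pvWin cs p n) = K := by rw [hww]; exact hKw
            simp [hpp, this]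
        rw [this]
        exact hw3
      have hsmall : ∀ w, 3 ≤ bucket.countP (fun p => decide (pvWin cs p n = w)) →
          3 ≤ (pvPos (q + 2)).countP (fun p => decide (pvWin cs p n = w)) := by
        intro w hw3
        calc 3 ≤ bucket.countP (fun p => decide (pvWin cs p n = w)) := hw3
          _ ≤ (pvPos (q + 2)).countP (fun p => decide (pvWin cs p n = w)) :=
            (List.filter_sublist).countP_le
      have hrec : (∀ w, (pvPos (q + 2)).countP (fun p => decide (pvWin cs p n = w)) ≤ 2) →
          (pvMainLoop cs n (PySem.Int.powMod 26 (n - 1).toNat pvMOD) K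
              (D.insert K bucket) (i + 1) = true
            ↔ pvTrip cs n (cs.length - n.toNat + 1)) := by
        intro hcnt'
        apply ih (i + 1) K (D.insert K bucket) (by omega) (by omega) (by omega)
        · have hq1 : (i + 1) - n.toNat = q + 1 := by omega
          rw [hq1]
        · intro k
          have hq1 : (i + 1) - n.toNat + 1 = q + 2 := by omega
          rw [hq1]
          by_cases hkK : k = K
          · subst hkK
            rw [PySem.Dict.getD_insert_self]
          · rw [PySem.Dict.getD_insert_of_ne D bucket [] (fun hh => hkK hh)]
            rw [hD k]
            have : q + 2 = (q + 1) + 1 := by omega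
            rw [this, pvPos_succ (q + 1), List.filter_append]
            have : [(((q + 1 : Nat)) : Int)].filter
                (fun p => decide (pvHash (pvWin cs p n) = k)) = [] := by
              rw [List.filter_singleton, hb]
              simp only [Bool.cond_eq_ite, decide_eq_true_eq]
              rw [if_neg (fun hh => hkK hh.symm)]
            rw [this, List.append_nil]
        · intro w
          have hq1 : (i + 1) - n.toNat + 1 = q + 2 := by omega
          rw [hq1]
          exact hcnt' w
      by_cases hlen : 2 < bucket.length
      · rw [if_pos hlen]
        by_cases hcmp : pvCompare cs n bucket = true
        · rw [if_pos hcmp]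
          refine iff_of_true rfl ?_
          obtain ⟨w, hw3⟩ := (pvCompare_spec cs n bucket).mp hcmp
          rw [pvTrip_iff_pos]
          refine ⟨w, le_trans (hsmall w hw3) (pvPos_countP_mono cs n w (by omega))⟩
        · rw [if_neg hcmp]
          apply hrec
          intro w
          by_contra hgt
          exact hcmp ((pvCompare_spec cs n bucket).mpr ⟨w, hbig w (by omega)⟩)
      · rw [if_neg hlen]
        apply hrec
        intro w
        by_contra hgt
        have h3b := hbig w (by omega)
        have := List.countP_le_length
          (p := fun p => decide (pvWin cs p n = w)) (l := bucket)
        omega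
    · rw [pvMainLoop, dif_neg hi]
      simp only [Bool.false_eq_true, false_iff]
      rw [pvTrip_iff_pos]
      rintro ⟨w, hw⟩
      have hi' : i = cs.length := by omega
      subst hi'
      exact absurd hw (by have := hcnt w; omega)

-- ---------- alt loop ----------

lemma pvAltLoop_spec (cs : List Char) (n : Int) (cnt : Nat) :
    ∀ i counts, i ≤ cnt →
      (∀ w : List Char, counts.getD w 0 =
        ((List.range i).countP (fun q : Nat => decide (pvWin cs (q : Int) n = w)) : Int)) →
      (∀ w : List Char, counts.getD w 0 ≤ 2) →
      (pvAltLoop cs n counts i cnt = true ↔ pvTrip cs n cnt) := by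
  suffices h : ∀ d i counts, cnt - i ≤ d → i ≤ cnt →
      (∀ w : List Char, counts.getD w 0 =
        ((List.range i).countP (fun q : Nat => decide (pvWin cs (q : Int) n = w)) : Int)) →
      (∀ w : List Char, counts.getD w 0 ≤ 2) →
      (pvAltLoop cs n counts i cnt = true ↔ pvTrip cs n cnt) by
    intro i counts h1 h2 h3
    exact h cnt i counts (by omega) h1 h2 h3
  intro d
  induction d with
  | zero =>
    intro i counts hd h1 hcounts hbound
    have hic : i = cnt := by omega
    subst hic
    rw [pvAltLoop, if_neg (by omega)]
    simp only [Bool.false_eq_true, false_iff]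
    rintro ⟨w, hw⟩
    have := hcounts w
    have := hbound w
    omega
  | succ d ih =>
    intro i counts hd h1 hcounts hbound
    by_cases hic : i < cnt
    · rw [pvAltLoop, if_pos hic]
      simp only []
      have hwin : PySem.List.slice cs (some (i : Int)) (some ((i : Int) + n))
          = pvWin cs (i : Int) n := rfl
      rw [hwin]
      set W := pvWin cs (i : Int) n with hW
      have hc : counts.getD W 0 + 1
          = ((List.range (i + 1)).countP (fun q : Nat => decide (pvWin cs (q : Int) n = W)) : Int) := by
        rw [hcounts W, List.range_succ, List.countP_append, List.countP_singleton,
          if_pos (decide_eq_true rfl)]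
        push_cast
        ring
      by_cases h3 : counts.getD W 0 + 1 = 3
      · rw [if_pos h3]
        refine iff_of_true rfl ⟨W, ?_⟩
        have hmono : (List.range (i + 1)).countP (fun q : Nat => decide (pvWin cs (q : Int) n = W))
            ≤ (List.range cnt).countP (fun q : Nat => decide (pvWin cs (q : Int) n = W)) :=
          (List.range_sublist.mpr (by omega)).countP_le
        omega
      · rw [if_neg h3]
        apply ih (i + 1) (counts.insert W (counts.getD W 0 + 1)) (by omega) (by omega)
        · intro w
          by_cases hwW : w = W
          · subst hwW
            rw [PySem.Dict.getD_insert_self]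
            exact hc
          · rw [PySem.Dict.getD_insert_of_ne counts (counts.getD W 0 + 1) 0 hwW]
            rw [hcounts w, List.range_succ, List.countP_append, List.countP_singleton]
            rw [if_neg (by simp only [decide_eq_true_eq]; exact fun hh => hwW (hW ▸ hh.symm))]
            simp
        · intro w
          by_cases hwW : w = W
          · subst hwW
            rw [PySem.Dict.getD_insert_self]
            have := hbound W
            omega
          · rw [PySem.Dict.getD_insert_of_ne counts (counts.getD W 0 + 1) 0 hwW]
            exact hbound w
    · rw [pvAltLoop, if_neg hic]
      simp only [Bool.false_eq_true, false_iff]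
      rintro ⟨w, hw⟩
      have hic' : i = cnt := by omega
      subst hic'
      have := hcounts w
      have := hbound w
      omega


-- ===== VERDICT (by name: the statement is the Claim_ definition above) =====
theorem find_3_spec : Claim_equal_find_3 := by
  unfold Claim_equal_find_3
  intro s n hdom hpre
  unfold Pre_find_3 at hpre
  unfold Spec_find_3 find_3 find_3_alt
  simp only []
  set cs := s.toList with hcs
  have halt : ∀ cnt : Nat,
      (pvAltLoop cs n PySem.Dict.empty 0 cnt = true ↔ pvTrip cs n cnt) := by
    intro cnt
    apply pvAltLoop_spec cs n cnt 0 PySem.Dict.empty (by omega)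
    · intro w
      rw [PySem.Dict.getD_empty]
      simp
    · intro w
      rw [PySem.Dict.getD_empty]
      norm_num
  by_cases hg1 : n > (cs.length : Int) - 2
  · rw [if_pos hg1]
    have hcnt : ((cs.length : Int) - n + 1).toNat ≤ 2 := by omega
    cases halt' : pvAltLoop cs n PySem.Dict.empty 0 ((cs.length : Int) - n + 1).toNat with
    | false => rfl
    | true =>
      obtain ⟨w, hw⟩ := (halt _).mp halt'
      have := List.countP_le_length
        (p := fun q : Nat => decide (pvWin cs (q : Int) n = w))
        (l := List.range (((cs.length : Int) - n + 1).toNat))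
      rw [List.length_range] at this
      omega
  · rw [if_neg hg1]
    by_cases hg0 : n = 0
    · subst hg0
      rw [if_pos rfl]
      have hlen : 2 ≤ cs.length := by omega
      symm
      rw [halt _]
      refine ⟨[], ?_⟩
      have hall : (List.range (((cs.length : Int) - 0 + 1).toNat)).countP
          (fun q : Nat => decide (pvWin cs (q : Int) 0 = []))
          = (List.range (((cs.length : Int) - 0 + 1).toNat)).length := by
        apply List.countP_eq_length.mpr
        intro q hq
        have : pvWin cs ((q : Nat) : Int) 0 = pvWinN cs q 0 := pvWin_cast cs q 0 (by omega)
        rw [this]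
        simp [pvWinN]
      rw [hall, List.length_range]
      omega
    · rw [if_neg hg0]
      have hn : 1 ≤ n := by omega
      have hnn : n.toNat ≤ cs.length := by omega
      set key0 := (List.range n.toNat).foldl
        (fun k i => PySem.Int.mod (k * 26 + (((cs.getD i 'A').toNat : Int) - pvOFF)) pvMOD) 0
        with hkey0def
      have hkey0 : key0 = pvHash (pvWinN cs (n.toNat - n.toNat) n.toNat) := by
        rw [hkey0def, pvInitKey cs n.toNat hnn]
        have : n.toNat - n.toNat = 0 := by omega
        rw [this]
      have hW0 : pvHash (pvWin cs ((0 : Nat) : Int) n) = key0 := by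
        rw [pvWin_cast cs 0 n (by omega), hkey0]
        have : n.toNat - n.toNat = 0 := by omega
        rw [this]
      have hpos1 : pvPos 1 = [((0 : Nat) : Int)] := rfl
      have hD0 : ∀ k : Int, ((PySem.Dict.empty.insert key0 [(0 : Int)]).getD k []
          : List Int) = (pvPos (n.toNat - n.toNat + 1)).filter
            (fun p => decide (pvHash (pvWin cs p n) = k)) := by
        intro k
        have : n.toNat - n.toNat + 1 = 1 := by omega
        rw [this, hpos1, List.filter_singleton]
        by_cases hk : k = key0
        · subst hk
          rw [PySem.Dict.getD_insert_self, hW0]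
          simp
        · rw [PySem.Dict.getD_insert_of_ne PySem.Dict.empty [(0 : Int)] [] hk,
            PySem.Dict.getD_empty, hW0]
          simp only [Bool.cond_eq_ite, decide_eq_true_eq]
          rw [if_neg (fun hh => hk hh.symm)]
      have hcnt0 : ∀ w, (pvPos (n.toNat - n.toNat + 1)).countP
          (fun p => decide (pvWin cs p n = w)) ≤ 2 := by
        intro w
        have h1 := List.countP_le_length
          (p := fun p => decide (pvWin cs p n = w)) (l := pvPos (n.toNat - n.toNat + 1))
        rw [pvPos_length] at h1
        omega
      have hmain := pvMainLoop_spec cs n hn hnn n.toNat key0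
        (PySem.Dict.empty.insert key0 [(0 : Int)]) (le_refl _) hnn hkey0 hD0 hcnt0
      have htot : ((cs.length : Int) - n + 1).toNat = cs.length - n.toNat + 1 := by omega
      rw [htot]
      exact Bool.eq_iff_iff.mpr (hmain.trans (halt _).symm)
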